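-- pv_equiv track=rewrite | github.com/forewing/lc | contests/kickstart-2021H/p2.py | solve
-- ===== SOURCE A (Python) =====
-- lookup = {
--     'U': set(),
--     'R': {0},
--     'Y': {1},
--     'B': {2},
--     'O': {0, 1},
--     'P': {0, 2},
--     'G': {1, 2},
--     'A': {0, 1, 2},
-- }
--
-- total = {0, 1, 2}
--
-- def solve(n, s):
--     pens = [False] * 3
--     ans = 0
--     for c in s:
--         for p in total - lookup[c]:
--             pens[p] = False
--         for p in lookup[c]:
--             if not pens[p]:
--                 ans += 1
--                 pens[p] = True
--     return ans
-- ===== SOURCE B (Python) =====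
-- lookup = {
--     'U': set(),
--     'R': {0},
--     'Y': {1},
--     'B': {2},
--     'O': {0, 1},
--     'P': {0, 2},
--     'G': {1, 2},
--     'A': {0, 1, 2},
-- }
--
-- def solve(n, s):
--     sets = [lookup[c] for c in s]
--     ans = 0
--     for p in range(3):
--         for prev, cur in zip([set()] + sets, sets):
--             if p in cur and p not in prev:
--                 ans += 1
--     return ans
-- ===== Notes on version B (the rewrite author's own statement) =====
-- stated objective: alternative
-- what changed: Replaces A's single stateful pass (mutable pens boolean array with reset/refill inner loops) by a staged computation: first map the string to its list of required-pen sets, then for each of the three pens separately count rising edges (pen required now but not at the previous position) over adjacent pairs; no mutable pen state is kept.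
import Mathlib
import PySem

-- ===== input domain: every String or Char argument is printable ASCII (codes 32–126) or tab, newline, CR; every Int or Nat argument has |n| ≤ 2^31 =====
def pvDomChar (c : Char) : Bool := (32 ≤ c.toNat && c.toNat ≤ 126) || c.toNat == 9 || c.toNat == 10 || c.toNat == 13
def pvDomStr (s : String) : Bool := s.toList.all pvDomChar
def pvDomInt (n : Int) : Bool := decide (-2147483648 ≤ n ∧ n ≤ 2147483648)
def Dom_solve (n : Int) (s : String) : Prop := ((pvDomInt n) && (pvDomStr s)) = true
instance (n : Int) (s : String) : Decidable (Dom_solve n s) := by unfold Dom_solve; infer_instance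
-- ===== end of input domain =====

-- B replaces A's single stateful pass (mutable pen array, reset/refill loops) by a staged
-- computation: map to required-pen sets, then count per-pen rising edges over adjacent pairs.

-- ===== PORT A =====
-- the module-level lookup table ('U'.. 'A' → set of pens); these are the dict's only keys
def lookupT (c : Char) : List Int :=
  if c = 'U' then []
  else if c = 'R' then [0]
  else if c = 'Y' then [1]
  else if c = 'B' then [2]
  else if c = 'O' then [0, 1]
  else if c = 'P' then [0, 2]
  else if c = 'G' then [1, 2]
  else [0, 1, 2]   -- 'A'; any other key is a KeyError in Python, excluded by Pre_solve

-- body of A's second inner loop: 'if not pens[p]: ans += 1; pens[p] = True'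
def refillF (pa : List Bool × Int) (p : Int) : List Bool × Int :=
  if pa.1.getD p.toNat false = false then (pa.1.set p.toNat true, pa.2 + 1) else pa

-- one iteration of A's outer loop: reset pens in total - lookup[c], then refill pens in lookup[c]
def stepA (st : List Bool × Int) (c : Char) : List Bool × Int :=
  let cur := lookupT c
  let pens := (([0, 1, 2] : List Int).filter (fun p => ¬ p ∈ cur)).foldl
                (fun ps p => ps.set p.toNat false) st.1
  cur.foldl refillF (pens, st.2)

def solve (n : Int) (s : String) : Int :=
  (s.toList.foldl stepA ([false, false, false], 0)).2

-- ===== PORT B =====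
-- sets = [lookup[c] for c in s]; then for each pen p count rising edges over zip([set()]+sets, sets)
def edgeF (p : Int) (a : Int) (pr : List Int × List Int) : Int :=
  if p ∈ pr.2 ∧ ¬ p ∈ pr.1 then a + 1 else a

def solve_alt (n : Int) (s : String) : Int :=
  let sets := s.toList.map lookupT
  (PySem.List.pyRange 0 3 1).foldl
    (fun ans p => ((([] : List Int) :: sets).zip sets).foldl (edgeF p) ans) 0

-- ===== PRECONDITION & SPEC =====
-- the dict's keys; Pre_ excludes exactly the strings containing a character outside them,
-- on which A (and B) raise KeyError.
def keysL : List Char := ['U', 'R', 'Y', 'B', 'O', 'P', 'G', 'A']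

def Pre_solve (n : Int) (s : String) : Prop :=
  s.toList.all (fun c => keysL.contains c) = true
instance (n : Int) (s : String) : Decidable (Pre_solve n s) := by unfold Pre_solve; infer_instance

def pvWitness_solve : Int × String := (0, "RYGA")

def Spec_solve (n : Int) (s : String) (out : Int) : Prop := out = solve_alt n s
instance (n : Int) (s : String) (out : Int) : Decidable (Spec_solve n s out) := by unfold Spec_solve; infer_instance

-- ===== CLAIM (what is proved, stated in full; the proofs are below) =====
def Claim_equal_solve : Prop := ∀ (n : Int) (s : String), Dom_solve n s → Pre_solve n s → Spec_solve n s (solve n s)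

-- ===== LEMMAS AND PROOFS =====

-- the boolean pen array A maintains is the indicator of the previous required set
def ind (prev : List Int) : List Bool :=
  [decide ((0 : Int) ∈ prev), decide ((1 : Int) ∈ prev), decide ((2 : Int) ∈ prev)]

-- the possible values of a required set (initial [] plus the eight table entries)
def prevs : List (List Int) :=
  [[], [0], [1], [2], [0, 1], [0, 2], [1, 2], [0, 1, 2]]

-- number of rising edges at one position (the per-position refill count)
def e (prev cur : List Int) : Int :=
  (if (0 : Int) ∈ cur ∧ ¬ (0 : Int) ∈ prev then 1 else 0)
  + (if (1 : Int) ∈ cur ∧ ¬ (1 : Int) ∈ prev then 1 else 0)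
  + (if (2 : Int) ∈ cur ∧ ¬ (2 : Int) ∈ prev then 1 else 0)

-- B's nested fold, as a function of the previous set and the remaining sets
def T (prev : List Int) (l : List (List Int)) : Int :=
  (PySem.List.pyRange 0 3 1).foldl (fun ans p => ((prev :: l).zip l).foldl (edgeF p) ans) 0

theorem lookupT_mem_prevs (c : Char) : lookupT c ∈ prevs := by
  unfold lookupT prevs; split_ifs <;> simp

-- the inner edge-count fold starting from accumulator 0
def cnt (p : Int) (pairs : List (List Int × List Int)) : Int :=
  pairs.foldl (edgeF p) 0

-- the inner edge-count fold only translates its accumulator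
theorem foldl_edge (pairs : List (List Int × List Int)) (p a : Int) :
    pairs.foldl (edgeF p) a = a + cnt p pairs := by
  induction pairs generalizing a with
  | nil => simp [cnt]
  | cons pr rest ih =>
      simp only [cnt, List.foldl, edgeF]
      split
      · rw [ih (a + 1), ih (0 + 1), cnt]; ring
      · rw [ih a, ih 0, cnt]; ring

theorem cnt_cons (p : Int) (pr : List Int × List Int) (rest : List (List Int × List Int)) :
    cnt p (pr :: rest) = (if p ∈ pr.2 ∧ ¬ p ∈ pr.1 then 1 else 0) + cnt p rest := by
  have h : cnt p (pr :: rest) = List.foldl (edgeF p) (edgeF p 0 pr) rest := rfl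
  rw [h, foldl_edge]
  simp only [edgeF]
  split <;> ring

theorem T_eq (prev : List Int) (l : List (List Int)) :
    T prev l = cnt 0 ((prev :: l).zip l) + cnt 1 ((prev :: l).zip l) + cnt 2 ((prev :: l).zip l) := by
  have hr : PySem.List.pyRange 0 3 1 = [0, 1, 2] := by decide
  unfold T
  rw [hr]
  simp only [List.foldl, foldl_edge]
  ring

-- T's recursion: one position contributes e prev x, the rest continues from x
theorem T_cons (prev x : List Int) (xs : List (List Int)) :
    T prev (x :: xs) = e prev x + T x xs := by
  have hz : ((prev :: x :: xs).zip (x :: xs)) = (prev, x) :: ((x :: xs).zip xs) := rfl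
  rw [T_eq, T_eq, hz, cnt_cons, cnt_cons, cnt_cons]
  unfold e
  ring

-- A's refill-loop counter only translates the starting accumulator
theorem refill_shift (l : List Int) (pens : List Bool) (a : Int) :
    l.foldl refillF (pens, a)
      = ((l.foldl refillF (pens, 0)).1, a + (l.foldl refillF (pens, 0)).2) := by
  induction l generalizing pens a with
  | nil => simp
  | cons p l ih =>
      simp only [List.foldl, refillF]
      split
      · rw [ih _ (a + 1), ih _ (0 + 1)]
        simp only [Prod.mk.injEq, true_and]
        ring
      · exact ih _ a

theorem stepA_shift (c : Char) (pens : List Bool) (a : Int) :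
    stepA (pens, a) c = ((stepA (pens, 0) c).1, a + (stepA (pens, 0) c).2) := by
  simp only [stepA]
  exact refill_shift _ _ a

-- the 8×8 finite case table: one A-step from a matching state refills exactly e prev cur pens
theorem stepA_eq_zero (c : Char) (hc : c ∈ keysL) :
    ∀ prev ∈ prevs,
      stepA (ind prev, 0) c = (ind (lookupT c), e prev (lookupT c)) := by
  fin_cases hc <;> decide

theorem foldl_eq (l : List Char) (prev : List Int) (a : Int)
    (hl : ∀ c ∈ l, c ∈ keysL) (hp : prev ∈ prevs) :
    (l.foldl stepA (ind prev, a)).2 = a + T prev (l.map lookupT) := by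
  induction l generalizing prev a with
  | nil =>
      simp only [List.foldl, List.map]
      rw [T_eq]
      simp [cnt]
  | cons c l ih =>
      simp only [List.foldl, List.map]
      rw [stepA_shift, stepA_eq_zero c (hl c (by simp)) prev hp]
      rw [ih _ _ (fun d hd => hl d (by simp [hd])) (lookupT_mem_prevs c)]
      rw [T_cons]
      ring

-- ===== VERDICT (by name: the statement is the Claim_ definition above) =====
theorem solve_spec : Claim_equal_solve := by
  intro n s _ hpre
  unfold Spec_solve solve solve_alt
  have hl : ∀ c ∈ s.toList, c ∈ keysL := by
    intro c hc
    have h1 := List.all_eq_true.mp hpre c hc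
    simpa using h1
  have h := foldl_eq s.toList [] 0 hl (by simp [prevs])
  simpa [ind, T] using h
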